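-- pv_equiv track=rewrite | github.com/DavidJilg/DALG | src/jilg/Model/MilpSolver.py | replace_brackets
-- ===== SOURCE A (Python) =====
-- def replace_brackets(string, bracket_list):
--     bracketListIndex = len(bracket_list)
--     while '(' in string:
--         firstBracketIndex = string.find('(')
--         bracketIndex = firstBracketIndex + 1
--         bracketCount = 1
--         while bracketCount != 0:
--             if string[bracketIndex] == '(':
--                 bracketCount += 1
--             elif string[bracketIndex] == ')':
--                 bracketCount -= 1
--             bracketIndex += 1
--         bracket_list.append(string[firstBracketIndex + 1:bracketIndex - 1])
--         string = string[0:firstBracketIndex] + "bracket" + str(bracketListIndex) + string[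
--                                                                                    bracketIndex:]
--         bracketListIndex += 1
--     return string, bracket_list
-- ===== SOURCE B (Python) =====
-- def replace_brackets(string, bracket_list):
--     # One pass over the string tracking parenthesis depth; like A it appends
--     # the collected group contents to the bracket_list argument in place.
--     idx = len(bracket_list)
--     out = []
--     buf = []
--     depth = 0
--     for ch in string:
--         if ch == '(':
--             depth += 1
--             if depth > 1:
--                 buf.append(ch)
--         elif ch == ')' and depth > 0:
--             depth -= 1
--             if depth == 0:
--                 bracket_list.append(''.join(buf))
--                 buf = []
--                 out.append('bracket' + str(idx))
--                 idx += 1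
--             else:
--                 buf.append(ch)
--         elif depth > 0:
--             buf.append(ch)
--         else:
--             out.append(ch)
--     return ''.join(out), bracket_list
-- ===== Notes on version B (the rewrite author's own statement) =====
-- stated objective: alternative
-- what changed: A repeatedly re-scans the string (find '(' plus an inner counting loop plus a full string rebuild per group); B is a single left-to-right pass tracking parenthesis depth, emitting placeholders and collecting group contents as it goes.
import Mathlib
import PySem

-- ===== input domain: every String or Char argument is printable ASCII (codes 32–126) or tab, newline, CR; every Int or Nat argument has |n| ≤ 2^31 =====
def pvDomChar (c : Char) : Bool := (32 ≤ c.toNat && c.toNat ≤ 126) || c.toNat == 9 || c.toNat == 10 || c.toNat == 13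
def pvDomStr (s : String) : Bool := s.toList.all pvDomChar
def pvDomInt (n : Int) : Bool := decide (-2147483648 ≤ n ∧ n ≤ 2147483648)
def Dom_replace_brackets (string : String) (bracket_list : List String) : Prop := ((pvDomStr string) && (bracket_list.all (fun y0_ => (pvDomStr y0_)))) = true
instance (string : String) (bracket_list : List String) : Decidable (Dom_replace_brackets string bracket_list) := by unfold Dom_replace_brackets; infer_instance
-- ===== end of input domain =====

-- B replaces A's repeated find-and-rebuild outer loop by a single left-to-right pass that
-- tracks parenthesis depth; both Pythons also append the collected contents to the
-- bracket_list argument in place (the same mutation); the equivalence proved here is about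
-- the return value.

-- shared helper: Python's str(n) for a nonnegative int, as the digit list (both Pythons call
-- 'bracket' + str(idx) with idx a nonnegative count; exact on that domain)
def digitChar (d : Nat) : Char :=
  match d with
  | 0 => '0' | 1 => '1' | 2 => '2' | 3 => '3' | 4 => '4'
  | 5 => '5' | 6 => '6' | 7 => '7' | 8 => '8' | _ => '9'

def natStr (n : Nat) : List Char :=
  if h : n < 10 then [digitChar n]
  else natStr (n / 10) ++ [digitChar (n % 10)]
  decreasing_by exact Nat.div_lt_self (by omega) (by omega)

-- 'bracket' + str(idx), the placeholder both Pythons build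
def placeholder (i : Nat) : List Char :=
  'b' :: 'r' :: 'a' :: 'c' :: 'k' :: 'e' :: 't' :: natStr i

-- ===== PORT A =====
-- "'(' in string" / "string.find('(')": index of the first '(' (none = absent); exact for a
-- single-character needle, fusing the 'in' test with the find the loop body repeats
def findOpen : List Char → Option Nat
  | [] => none
  | c :: t => if c = '(' then some 0 else (findOpen t).map (· + 1)

-- A's inner while loop over the suffix after the first '(': returns the number of characters
-- consumed until bracketCount hits 0 (none = the scan runs past the end, Python's IndexError)
def innerScanA (cnt : Int) : List Char → Option Nat
  | [] => if cnt = 0 then some 0 else none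
  | c :: t =>
    if cnt = 0 then some 0
    else (innerScanA (if c = '(' then cnt + 1 else if c = ')' then cnt - 1 else cnt) t).map (· + 1)

-- A's outer while loop; slices string[0:first], string[first+1:bracketIndex-1], string[bracketIndex:]
-- are take/drop with in-range nonnegative bounds (= PySem slice_natCast's value). fuel is an upper
-- bound on the remaining iterations (each iteration removes at least one '(' from the string).
def outerA : Nat → List Char → List String → Nat → List Char × List String
  | 0, s, acc, _ => (s, acc)
  | fuel + 1, s, acc, idx =>
    match findOpen s with
    | none => (s, acc)
    | some k =>
      match innerScanA 1 (s.drop (k + 1)) with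
      | none => (s, acc)  -- Python raises IndexError here; such inputs are outside Pre_
      | some m =>
        outerA fuel (s.take k ++ placeholder idx ++ (s.drop (k + 1)).drop m)
          (acc ++ [String.mk ((s.drop (k + 1)).take (m - 1))]) (idx + 1)

def replace_brackets (string : String) (bracket_list : List String) : String × List String :=
  let s := string.toList
  let r := outerA (s.count '(' + 1) s bracket_list bracket_list.length
  (String.mk r.1, r.2)

-- ===== PORT B =====
-- B's single for-loop: state = (depth, out, buf, bracket_list, idx)
def goB : List Char → Nat → List Char → List Char → List String → Nat → List Char × List String
  | [], _, out, _, acc, _ => (out, acc)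
  | c :: t, depth, out, buf, acc, idx =>
    if c = '(' then
      if depth + 1 > 1 then goB t (depth + 1) out (buf ++ [c]) acc idx
      else goB t (depth + 1) out buf acc idx
    else if c = ')' ∧ 0 < depth then
      if depth - 1 = 0 then
        goB t (depth - 1) (out ++ placeholder idx) [] (acc ++ [String.mk buf]) (idx + 1)
      else goB t (depth - 1) out (buf ++ [c]) acc idx
    else if 0 < depth then goB t depth out (buf ++ [c]) acc idx
    else goB t depth (out ++ [c]) buf acc idx

def replace_brackets_alt (string : String) (bracket_list : List String) : String × List String :=
  let r := goB string.toList 0 [] [] bracket_list bracket_list.length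
  (String.mk r.1, r.2)

-- ===== PRECONDITION & SPEC =====
-- the standard matched-parenthesis depth scan ('(' opens, ')' closes the innermost open one,
-- a ')' with nothing open is plain text — Nat subtraction clamps at 0)
def depthScan : Nat → List Char → Nat
  | d, [] => d
  | d, c :: t => depthScan (if c = '(' then d + 1 else if c = ')' then d - 1 else d) t

-- Pre_ = every '(' in the string has a matching ')' — exactly the inputs on which A returns
-- (on an unmatched '(' A's inner scan runs past the end of the string and raises IndexError)
def Pre_replace_brackets (string : String) (bracket_list : List String) : Prop :=
  depthScan 0 string.toList = 0
instance (string : String) (bracket_list : List String) : Decidable (Pre_replace_brackets string bracket_list) := by unfold Pre_replace_brackets; infer_instance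

def pvWitness_replace_brackets : String × List String := ("x(a(b)c)y()", ["q"])

def Spec_replace_brackets (string : String) (bracket_list : List String) (out : String × List String) : Prop := out = replace_brackets_alt string bracket_list
instance (string : String) (bracket_list : List String) (out : String × List String) : Decidable (Spec_replace_brackets string bracket_list out) := by unfold Spec_replace_brackets; infer_instance

-- ===== CLAIM (what is proved, stated in full; the proofs are below) =====
def Claim_equal_replace_brackets : Prop := ∀ (string : String) (bracket_list : List String), Dom_replace_brackets string bracket_list → Pre_replace_brackets string bracket_list → Spec_replace_brackets string bracket_list (replace_brackets string bracket_list)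


-- ===== LEMMAS AND PROOFS =====

theorem notOpen_digitChar (d : Nat) : digitChar d ≠ '(' := by
  unfold digitChar; split <;> decide

theorem notOpen_natStr (n : Nat) : '(' ∉ natStr n := by
  fun_induction natStr n with
  | case1 n h => simp [(notOpen_digitChar n).symm]
  | case2 n h ih => simp [ih, (notOpen_digitChar (n % 10)).symm]

theorem notOpen_placeholder (i : Nat) : '(' ∉ placeholder i := by
  simpa [placeholder] using notOpen_natStr i

theorem findOpen_eq_none (s : List Char) : findOpen s = none ↔ '(' ∉ s := by
  induction s with
  | nil => simp [findOpen]
  | cons c t ih =>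
    by_cases hc : c = '(' <;> simp [findOpen, hc, ih, eq_comm]

theorem findOpen_eq_some (s : List Char) (k : Nat) (h : findOpen s = some k) :
    ∃ p t, s = p ++ '(' :: t ∧ '(' ∉ p ∧ p.length = k := by
  induction s generalizing k with
  | nil => simp [findOpen] at h
  | cons c t ih =>
    by_cases hc : c = '('
    · subst hc
      simp [findOpen] at h
      exact ⟨[], t, by simp [← h]⟩
    · simp [findOpen, hc] at h
      obtain ⟨k', hk', rfl⟩ := h
      obtain ⟨p, t', rfl, hp, rfl⟩ := ih k' hk'
      exact ⟨c :: p, t', by simp [hc, hp, eq_comm]⟩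

theorem innerScan_pos (cnt : Int) (t : List Char) (m : Nat)
    (h : innerScanA cnt t = some m) (hc : cnt ≠ 0) : 1 ≤ m := by
  cases t with
  | nil => simp [innerScanA, hc] at h
  | cons c t =>
    simp [innerScanA, hc] at h
    obtain ⟨m', _, rfl⟩ := h
    omega

theorem depthScan_skip (p t : List Char) (hp : '(' ∉ p) :
    depthScan 0 (p ++ t) = depthScan 0 t := by
  induction p with
  | nil => rfl
  | cons c p ih =>
    simp only [List.mem_cons, not_or] at hp
    have hc : c ≠ '(' := fun h => hp.1 h.symm
    by_cases hc2 : c = ')' <;> simp [depthScan, hc, hc2, ih hp.2]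

theorem depthScan_inner (t : List Char) (d : Nat) (hd : 0 < d) (h : depthScan d t = 0) :
    ∃ m, innerScanA (↑d) t = some m ∧ depthScan 0 (t.drop m) = 0 := by
  induction t generalizing d with
  | nil => simp [depthScan] at h; omega
  | cons c t ih =>
    have hdz : d ≠ 0 := by omega
    by_cases hc : c = '('
    · obtain ⟨m, hm, h0⟩ := ih (d + 1) (by omega) (by simpa [depthScan, hc] using h)
      have hm' : innerScanA ((d : Int) + 1) t = some m := by
        have : ((d : Int) + 1) = ((d + 1 : Nat) : Int) := by push_cast; ring
        rw [this]; exact hm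
      refine ⟨m + 1, ?_, by simpa using h0⟩
      simp [innerScanA, hc, hdz, hm']
    · by_cases hc2 : c = ')'
      · by_cases hd1 : d = 1
        · subst hd1
          refine ⟨1, ?_, by simpa using (by simpa [depthScan, hc, hc2] using h)⟩
          cases t <;> simp [innerScanA, hc, hc2]
        · obtain ⟨m, hm, h0⟩ := ih (d - 1) (by omega)
            (by simpa [depthScan, hc, hc2] using h)
          have hm' : innerScanA ((d : Int) - 1) t = some m := by
            have : ((d : Int) - 1) = ((d - 1 : Nat) : Int) := by omega
            rw [this]; exact hm
          refine ⟨m + 1, ?_, by simpa using h0⟩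
          simp [innerScanA, hc, hc2, hdz, hm']
      · obtain ⟨m, hm, h0⟩ := ih d hd (by simpa [depthScan, hc, hc2] using h)
        refine ⟨m + 1, ?_, by simpa using h0⟩
        simp [innerScanA, hc, hc2, hdz, hm]

theorem goB_copy (p : List Char) (hp : '(' ∉ p) (t out acc : List _) (i : Nat) :
    goB (p ++ t) 0 out [] acc i = goB t 0 (out ++ p) [] acc i := by
  induction p generalizing out with
  | nil => simp
  | cons c p ih =>
    simp only [List.mem_cons, not_or] at hp
    have hc : c ≠ '(' := fun h => hp.1 h.symm
    simp only [List.cons_append, goB, hc, if_false]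
    rw [if_neg (by simp), if_neg (by simp), ih hp.2]
    simp

theorem goB_group (t : List Char) (d m : Nat) (hd : 0 < d)
    (h : innerScanA (↑d) t = some m) (out buf : List Char) (acc : List String) (i : Nat) :
    goB t d out buf acc i =
      goB (t.drop m) 0 (out ++ placeholder i) []
        (acc ++ [String.mk (buf ++ t.take (m - 1))]) (i + 1) := by
  induction t generalizing d m buf with
  | nil => simp [innerScanA] at h; omega
  | cons c t ih =>
    have hdz : ¬((d : Int) = 0) := by omega
    by_cases hc : c = '('
    · subst hc
      simp only [innerScanA, if_pos rfl, if_neg hdz, Option.map_eq_some_iff] at h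
      obtain ⟨m', hm', rfl⟩ := h
      have hm'' : innerScanA ((d + 1 : Nat) : Int) t = some m' := by
        have hcast : ((d + 1 : Nat) : Int) = (d : Int) + 1 := by push_cast; ring
        rw [hcast]; exact hm'
      obtain ⟨k, rfl⟩ : ∃ k, m' = k + 1 :=
        ⟨m' - 1, by have := innerScan_pos _ _ _ hm'' (by push_cast; omega); omega⟩
      have step := ih (d + 1) (k + 1) (by omega) hm'' (buf ++ ['('])
      simp only [goB, if_pos rfl, if_pos (by omega : d + 1 > 1)]
      rw [step]
      simp
    · by_cases hc2 : c = ')'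
      · subst hc2
        by_cases hd1 : d = 1
        · subst hd1
          have hm1 : m = 1 := by
            cases t <;> simp [innerScanA] at h <;> omega
          subst hm1
          simp only [goB, if_neg (by decide : ¬(')' = '(')),
            if_pos (show ')' = ')' ∧ 0 < 1 by exact ⟨rfl, by omega⟩), if_pos rfl]
          simp
        · simp only [innerScanA, if_neg (by decide : ¬(')' = '(')), if_pos rfl, if_neg hdz,
            Option.map_eq_some_iff] at h
          obtain ⟨m', hm', rfl⟩ := h
          have hm'' : innerScanA ((d - 1 : Nat) : Int) t = some m' := by
            have hcast : ((d - 1 : Nat) : Int) = (d : Int) - 1 := by omega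
            rw [hcast]; exact hm'
          obtain ⟨k, rfl⟩ : ∃ k, m' = k + 1 :=
            ⟨m' - 1, by
              have := innerScan_pos _ _ _ hm'' (by
                have h1 : (1 : Int) ≤ ((d - 1 : Nat) : Int) := by omega
                omega)
              omega⟩
          have step := ih (d - 1) (k + 1) (by omega) hm'' (buf ++ [')'])
          show (if (')' = '(') then _ else if (')' = ')' ∧ 0 < d) then _ else _) = _
          rw [if_neg (by decide : ¬(')' = '(')), if_pos (⟨rfl, hd⟩ : (')' = ')') ∧ 0 < d),
            if_neg (by omega : ¬(d - 1 = 0)), step]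
          simp
      · simp only [innerScanA, if_neg hc, if_neg hc2, if_neg hdz,
          Option.map_eq_some_iff] at h
        obtain ⟨m', hm', rfl⟩ := h
        obtain ⟨k, rfl⟩ : ∃ k, m' = k + 1 :=
          ⟨m' - 1, by have := innerScan_pos _ _ _ hm' hdz; omega⟩
        have step := ih d (k + 1) hd hm' (buf ++ [c])
        simp only [goB, if_neg hc, if_neg (by simp [hc2] : ¬(c = ')' ∧ 0 < d)),
          if_pos hd]
        rw [step]
        simp

theorem outerA_prefix (fuel : Nat) (p : List Char) (hp : '(' ∉ p) (t : List Char)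
    (acc : List String) (i : Nat) :
    outerA fuel (p ++ t) acc i =
      (p ++ (outerA fuel t acc i).1, (outerA fuel t acc i).2) := by
  induction fuel generalizing t acc i with
  | zero => simp [outerA]
  | succ fuel ih =>
    have hfind : findOpen (p ++ t) = (findOpen t).map (· + p.length) := by
      clear ih
      induction p with
      | nil => simp
      | cons c q ihq =>
        simp only [List.mem_cons, not_or] at hp
        have hc : c ≠ '(' := fun h => hp.1 h.symm
        simp only [List.cons_append, findOpen, if_neg hc, ihq hp.2]
        cases findOpen t <;> simp <;> omega
    cases hf : findOpen t with
    | none => simp [outerA, hfind, hf]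
    | some k =>
      have hdrop : (p ++ t).drop (k + p.length + 1) = t.drop (k + 1) := by
        have : k + p.length + 1 = p.length + (k + 1) := by omega
        rw [this, List.drop_length_add_append]
      have htake : (p ++ t).take (k + p.length) = p ++ t.take k := by
        have : k + p.length = p.length + k := by omega
        rw [this, List.take_length_add_append]
      simp only [outerA, hfind, hf, Option.map_some, hdrop, htake]
      cases hi : innerScanA 1 (t.drop (k + 1)) with
      | none => simp
      | some m =>
        simp only []
        rw [List.append_assoc p, List.append_assoc p]
        exact ih _ _ _

theorem main_equiv (fuel : Nat) (s : List Char) (out : List Char) (acc : List String) (i : Nat)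
    (hb : depthScan 0 s = 0) (hf : s.count '(' < fuel) :
    goB s 0 out [] acc i = (out ++ (outerA fuel s acc i).1, (outerA fuel s acc i).2) := by
  induction fuel generalizing s out acc i with
  | zero => omega
  | succ fuel ih =>
    cases hf : findOpen s with
    | none =>
      have hs : '(' ∉ s := (findOpen_eq_none s).mp hf
      have := goB_copy s hs [] out acc i
      simp only [List.append_nil] at this
      simp [outerA, hf, this, goB]
    | some k =>
      obtain ⟨p, t, rfl, hp, rfl⟩ := findOpen_eq_some s k hf
      have hb1 : depthScan 1 t = 0 := by
        rw [depthScan_skip p _ hp] at hb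
        simpa [depthScan] using hb
      obtain ⟨m, hm0, hrest⟩ := depthScan_inner t 1 (by omega) hb1
      have hm : innerScanA 1 t = some m := by exact_mod_cast hm0
      have hdrop : (p ++ '(' :: t).drop (p.length + 1) = t := by
        simpa using List.drop_length_add_append (l₁ := p) (l₂ := '(' :: t) 1
      have htake : (p ++ '(' :: t).take p.length = p := by
        simpa using List.take_length_add_append (l₁ := p) (l₂ := '(' :: t) 0
      have hcount : (t.drop m).count '(' < fuel := by
        have hsplit : t.count '(' = (t.take m).count '(' + (t.drop m).count '(' := by
          rw [← List.count_append, List.take_append_drop]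
        have : (p ++ '(' :: t).count '(' = p.count '(' + 1 + t.count '(' := by
          simp [List.count_append, List.count_cons]; omega
        omega
      -- A side
      have hA : outerA (fuel + 1) (p ++ '(' :: t) acc i =
          ((p ++ placeholder i) ++ (outerA fuel (t.drop m) (acc ++ [String.mk (t.take (m - 1))]) (i + 1)).1,
           (outerA fuel (t.drop m) (acc ++ [String.mk (t.take (m - 1))]) (i + 1)).2) := by
        simp only [outerA, hf, hdrop, htake, hm]
        have hp' : '(' ∉ p ++ placeholder i := by
          simp only [List.mem_append, not_or]
          exact ⟨hp, notOpen_placeholder i⟩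
        rw [List.append_assoc p, ← List.append_assoc p (placeholder i)]
        exact outerA_prefix fuel (p ++ placeholder i) hp' (t.drop m) _ _
      -- B side
      rw [goB_copy p hp ('(' :: t) out acc i]
      show (if ('(' = '(') then _ else _) = _
      rw [if_pos rfl, if_neg (by omega : ¬(0 + 1 > 1))]
      rw [goB_group t (0 + 1) m (by omega) (by exact_mod_cast hm) (out ++ p) [] acc i]
      rw [ih (t.drop m) (out ++ p ++ placeholder i) (acc ++ [String.mk ([] ++ t.take (m - 1))]) (i + 1) hrest hcount]
      rw [hA]
      simp

-- ===== VERDICT (by name: the statement is the Claim_ definition above) =====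
theorem replace_brackets_spec : Claim_equal_replace_brackets := by
  intro string bracket_list _ hpre
  unfold Spec_replace_brackets replace_brackets replace_brackets_alt
  have h := main_equiv (string.toList.count '(' + 1) string.toList [] bracket_list
    bracket_list.length hpre (by omega)
  simp [h]
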